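/- GENERATED by tools/from_farm_form.py from prooffarm-gif/accepted/GifAddExtensionBlock.1/Lemmas.lean (a worked proof of the farm's unit `GifAddExtensionBlock.1`,
   accepted by the verdict) — do not edit. -/
import Gif.Spec.Units.GifAddExtensionBlock_1
import Gif.Spec.AllSegs

/-!
  Lemmas for the unit `GifAddExtensionBlock.1` (segment 1 of `GifAddExtensionBlock`, 107B40H … 107BA6H and 107C24H … 107C48H; gifalloc.c
  l.231-245): the prologue, the load of `*blocks`, then `malloc(24)` (no list yet) or `reallocarray(*blocks, *count + 1, 24)`, the
  store of `*blocks`. THE MODEL OF A `reallocarray` CLIENT WITH ALL ITS OUTCOMES: in place, moved, failed — three heaps, ONE exit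
  assertion for the first two.

  THE IDEA (Gif/Spec/AllocCarry.lean, header). Neither callee writes a byte `Shape F R` reads (their footprints are loose for the OLD
  heap and forest: `Loose.alloc`, `Loose.realloc`): at the callee's return the shape of the ENTRY still holds — after a moving
  `realloc` the field `*blocks` dangles, which `Shape` does not mind, and the freed array's bytes are intact. What changed is the
  heap (`Hn`) and what it owns. The mid assertions (`gab1_MidA`, `gab1_MidB`) carry `Shape F R w.mem`, `Placed Hn F.owned`,
  `HeapInv Hn …` and `Owns Hn <the new list>`; the store of `*blocks` is then ONE step over `(Hn, w.mem)`: `GifOK.pend_first` /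
  `GifOK.pend_grown` (inside: `Shape.set_pend` with `ExtsAt.moved`, the copy hypothesis in the SAME memory: trivial in place,
  `copy_moved` after a move).

  §1  THE FUNCTION'S FRAME BETWEEN THE PROLOGUE AND THE CUT
      gab1_Body                 the registers the prologue set, the seven slots, `rem`, the contract's footprint, the text, the ABI
  §2  THE MID ASSERTIONS, at the callees' return labels
      gab1_MidA                 107C2EH (ret12): `malloc(24)` has returned (both outcomes in one `Owns` clause)
      gab1_MidB                 107B8FH (ret3): `reallocarray` has returned (failed | in place or moved)
  §3  THE WALK, one lemma per returned callee state (the split on the GHOST `F.pend` is made BEFORE the walk, in Proof.lean)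
      gab1_first_to_malloc      107B40H → 107C2EH (ret12)    no list: `malloc(24)`
      gab1_first_from_malloc    107C2EH → 107BA6H            the store of `*blocks`
      gab1_grow_to_realloc      107B40H → 107B8FH (ret3)     the list `x`: `reallocarray(x.arr, length + 1, 24)`
      gab1_grow_failed          107B8FH → 107C4DH            `reallocarray` returned NULL: GIF_ERROR, nothing changed
      gab1_grow_store           107B8FH → 107BA6H            in place or moved: the store of `*blocks`
  From the tree: `Loose.alloc`, `Loose.realloc`, `copy_moved`, `Placed.gif_where`, `GifOK.gif_where`, `.pend_where`, `.pend_live`,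
  `GifOK.pend_first`, `GifOK.pend_grown`, `GifAddExtensionBlock.frame_carry` (Gif/Spec/AllocCarry.lean), `slot_sameExcept`
  (LzwCarry.lean), `HeapPre.next_range` (HeapCarry.lean), `succ32_sext` (Words2.lean).
-/

open X86 X86.User Asan ProgX.Base ProgX.Base.Spec Gif.Spec

set_option maxRecDepth 4000
set_option maxHeartbeats 4000000

namespace Gif.Spec.GifAddExtensionBlock_1

/-! ### 1. The function's frame between the prologue and the cut -/

/-- **WHAT HOLDS BETWEEN THE PROLOGUE AND THE CUT 107BA6H besides the heap and the forest**: the registers the prologue set, the six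
saved registers and the return address in their slots, no input read, the contract's footprint so far, the text, the ABI's
invariant: the clauses of `AfterArray` that do not speak of the heap or the forest. Carried to a later memory by
`GifAddExtensionBlock.frame_carry`. -/
structure gab1_Body (R : Rd) (len : Nat) (u₀ e : State) (ret : Word) (w : State) : Prop where
  /-- six pushes and `sub rsp, 8` -/
  rsp : w.reg .rsp = e.reg .rsp - 56
  /-- `&gif.ExtensionBlocks` -/
  rbx : w.reg .rbx = e.reg .rsi
  /-- `&gif.ExtensionBlockCount` -/
  rbp : w.reg .rbp = e.reg .rdi
  /-- `Len`, zero-extended -/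
  r12 : (w.reg .r12).toNat = len
  /-- `ExtData` -/
  r13 : w.reg .r13 = e.reg .r8
  /-- `Function`, zero-extended -/
  r14 : (w.reg .r14).toNat = (e.reg .rdx).toNat % 2 ^ 32
  slot_r15 : w.mem.readLE (e.reg .rsp - 8) 8 = (e.reg .r15).toNat
  slot_r14 : w.mem.readLE (e.reg .rsp - 16) 8 = (e.reg .r14).toNat
  slot_r13 : w.mem.readLE (e.reg .rsp - 24) 8 = (e.reg .r13).toNat
  slot_r12 : w.mem.readLE (e.reg .rsp - 32) 8 = (e.reg .r12).toNat
  slot_rbp : w.mem.readLE (e.reg .rsp - 40) 8 = (e.reg .rbp).toNat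
  slot_rbx : w.mem.readLE (e.reg .rsp - 48) 8 = (e.reg .rbx).toNat
  /-- the return address is still in its slot -/
  slot_ra : UInt64.ofNat (w.mem.readLE (e.reg .rsp) 8) = ret
  rem : rem R w.mem = rem R e.mem
  same : Mem.SameExcept [⟨(e.reg .rsp).toNat - 208, (e.reg .rsp).toNat⟩, ⟨0x800000, 0x1000020⟩] e.mem w.mem
  code : Mem.EqOn ProgX.Base.L.textLo ProgX.Base.L.textHi u₀.mem w.mem
  abi : (conv u₀).inv w

/-! ### 2. The mid assertions -/

/-- **AT 107C2EH (ret12), `malloc(24)` HAS RETURNED** (l.236; the forest has no pending list). The shape of the ENTRY's forest still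
holds (`malloc` writes nothing it reads); the present heap `Hn` (the entry's, or that with the new object) owns what the forest
owns and the new object `(rax, 24)` — none if `rax = 0`: both outcomes in one clause. -/
structure gab1_MidA (H : Heap) (rest : List Obj) (frames : List (Nat × FrameLayout)) (F : Forest) (R : Rd) (len : Nat) (Hn : Heap)
    (u₀ e : State) (ret : Word) (w : State) : Prop where
  body : gab1_Body R len u₀ e ret w
  rip : w.rip = Gif.L.GifAddExtensionBlock.ret12
  region : SameRegion H Hn
  inv : HeapInv Hn rest frames ((e.reg .rsp).toNat - 56) w.mem
  shape : Shape F R w.mem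
  placed : Placed Hn F.owned
  owns : Owns Hn ((if (w.reg .rax).toNat = 0 then [] else [((w.reg .rax).toNat, 24)]) ++ F.owned)

/-- **AT 107B8FH (ret3), `reallocarray(*blocks, *count + 1, 24)` HAS RETURNED** (l.238; the pending list is `x`). The shape of the
ENTRY's forest still holds in all three outcomes. FAILED (`rax = 0`): the heap is the entry's, which owns what it owned. IN PLACE
or MOVED (`rax ≠ 0`): the present heap `Hn` owns the array `(rax, 24 · (length + 1))`, the counted blocks' bytes and the other
components' objects; the counted blocks' bytes at `rax` are those at `x.arr`; `Placed` says where the OLD array is (freed after a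
move, its bytes intact). -/
structure gab1_MidB (H : Heap) (rest : List Obj) (frames : List (Nat × FrameLayout)) (F : Forest) (R : Rd) (len : Nat) (x : Exts)
    (Hn : Heap) (u₀ e : State) (ret : Word) (w : State) : Prop where
  body : gab1_Body R len u₀ e ret w
  rip : w.rip = Gif.L.GifAddExtensionBlock.ret3
  region : SameRegion H Hn
  inv : HeapInv Hn rest frames ((e.reg .rsp).toNat - 56) w.mem
  shape : Shape F R w.mem
  placed : Placed Hn F.owned
  out : (w.reg .rax = 0 ∧ Hn = H ∧ Owns H F.owned) ∨
    ((w.reg .rax).toNat ≠ 0 ∧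
      Owns Hn (((w.reg .rax).toNat, (x.blocks.length + 1) * 24) :: (x.blocks.flatMap Blk.objs ++ F.ownedButPend)) ∧
      ∀ i, i < 24 * x.blocks.length → rd w.mem ((w.reg .rax).toNat + i) 1 = rd w.mem (x.arr + i) 1)

/-! ### 3. The walk -/

/-- **107B40H … 107B6BH, 107C24H … 107C29H, `call malloc`, 107C2EH (ret12)** (l.231-236): the prologue, the checked load of `*blocks`
(NULL: the forest has no pending list, `GifOK.pend_null_iff`), `malloc(24)`. Its precondition is the entry's `HeapPre` under the
pushes (`HeapPre.callee`); its footprint is loose (`Loose.alloc`): the shape of the entry still holds. BOTH OUTCOMES of `AllocPost`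
close `gab1_MidA`: the split on `H.Fits` comes LAST. -/
theorem gab1_first_to_malloc (Lay : Layout) (hLay : Lay.hi = 0x1000000) (μ : Microarch) (hμ : UserX.MicroOK μ) (u₀ : State)
    (hcode : HasCodeNat Lay u₀ Gif.L.GifAddExtensionBlock.entry Gif.Code.code_GifAddExtensionBlock.nat
      Gif.L.GifAddExtensionBlock.size)
    (h_malloc : ∀ (H : Heap) (rest : List Obj) (frames : List (Nat × FrameLayout)),
      Calls Lay μ ProgX.Base.WayInv (ProgX.Base.conv u₀) ProgX.Base.L.malloc.entry (ProgX.Base.Spec.malloc.spec H rest frames))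
    (h_load8 : Asan.SmallCheck Lay μ ProgX.Base.WayInv (ProgX.Base.CodeOK u₀) [.rax, .rcx, .rdx] 8
      ProgX.Base.L.__asan_load8_noabort.entry)
    (H : Heap) (rest : List Obj) (frames : List (Nat × FrameLayout)) (F : Forest) (R : Rd) (len : Nat) (e : State) (ret : Word)
    (he : AtEntry (conv u₀) Gif.L.GifAddExtensionBlock.entry (GifAddExtensionBlock.spec H rest frames F R len).frame ret e)
    (hpre : (GifAddExtensionBlock.spec H rest frames F R len).pre e) (hnone : F.pend = none) :
    ReachVia Lay μ ProgX.Base.WayInv e (fun w => ∃ Hn, gab1_MidA H rest frames F R len Hn u₀ e ret w) := by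
  -- 1. the entry state's facts
  v_entry he
  obtain ⟨henv, hrdi, hrsi, hrcx, hlen1, hlen2, hr8a, hr8b⟩ := hpre
  have hp := henv.heap
  have hok := hp.inv.heap
  have hbase := hp.base
  have hlimit := hp.limit
  have hcur := henv.ctx.cursor_range hp.inv.shadow
  -- where gif and the next chunk are (one inequality per hypothesis: the walker's side conditions)
  obtain ⟨hg1, hg2, hg3⟩ := henv.ok.gif_where hok hbase
  obtain ⟨hnx1, hnx2⟩ := HeapPre.next_range hp
  have hglive : H.Live F.gif 120 := henv.ok.gif_live
  have hm := h_malloc H rest frames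
  -- 2. the load of `*blocks`, as a fact for the walker: NULL (the forest has no pending list): the arm `*blocks != NULL` is pruned
  have hnull := (henv.ok.pend_null_iff hok).mpr hnone
  simp only [gfield] at hnull
  have l_blocks : e.mem.readLE (e.reg .rsi) 8 = 0 := by
    rw [rd_eq_readLE e.mem (e.reg .rsi) (F.gif + 88) 8 hrsi]
    exact hnull
  -- 3. the walk, to the return of `malloc`
  u_walk hcode [hμ.vendor] until [Gif.L.GifAddExtensionBlock.at_107c4d, Gif.L.GifAddExtensionBlock.at_107ba6]
    span [ProgX.Base.L.textLo, ProgX.Base.L.textHi] side (v_side)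
  case check_107b60 =>
    -- l.234 `*ExtensionBlocks`: inside gif
    have hun : ShadowUntouched e.mem s_107b60.mem := by v_untouched
    have hl : LiveIn (H.liveObjs ++ rest) frames F.gif 120 := hglive.liveIn rest frames (Nat.le_refl _) (Nat.le_refl _)
    exact hl.accSmall hp.inv.shadow hun _ 8 (by decide) (by u_omega) (by u_omega)
  case call_inv =>
    v_inv
  case pre_107c29 =>
    -- malloc's precondition: only stack was stored to (`HeapPre.callee`; the region is untouched: from ONE stack footprint)
    have hun : ShadowUntouched e.mem s_107c29.mem := by v_untouched
    have hstack : Mem.SameExcept [⟨(e.reg .rsp).toNat - 64, (e.reg .rsp).toNat⟩] e.mem s_107c29.mem := by u_same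
    have hsame : Mem.EqOn H.base H.limit e.mem s_107c29.mem := by
      rw [hbase, hlimit]
      apply hstack.eqOn
      intro y hy
      have e1 : y = ⟨(e.reg .rsp).toNat - 64, (e.reg .rsp).toNat⟩ := List.mem_singleton.mp hy
      subst e1
      simp only
      omega
    refine hp.callee hun hsame ?_ ?_ ?_
    · rw [w_rsp]
      u_omega
    · rw [w_rsp]
      u_omega
    · rw [w_rsp]
      u_omega
  -- 4. 107C2EH (ret12): `malloc` has returned: the invariant FIRST, then the post with its type ascribed, the argument a number
  have e24 : (Word.ofBV 24#32).toNat = 24 := by decide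
  have hpost : AllocPost H rest frames 32 (s_107c29.reg .rdi).toNat (r16 (s_107c29.reg .rdi).toNat) s_107c29 s_107c29r :=
    w_post
  rw [w_rdi_107c29, e24] at hpost
  clear w_post
  have habi : (conv u₀).inv s_107c29r := w_inv
  have e8 : (s_107c29.reg .rsp).toNat + 8 = (e.reg .rsp).toNat - 56 := by
    rw [w_rsp_107c29]
    u_omega
  v_after_call w_rsp_107c29 w_mem_107c29
  simp only [shadowSpan, w_rdi_107c29, e24] at w_same
  -- every window of the callee's footprint misses the six slots: stated ONCE, before the slot facts enter the context
  have ersp : (e.reg .rsp - 64).toNat = (e.reg .rsp).toNat - 64 := word_sub_toNat_le _ 64 (by omega)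
  have hmiss : ∀ off, 8 ≤ off → off ≤ 48 → ∀ y, y ∈
      [(⟨UInt64.toNat (e.reg .rsp - 64) - 32, UInt64.toNat (e.reg .rsp - 64)⟩ : Span),
       ⟨0x800000, 0x800008⟩,
       ⟨H.next - 32, H.next - 8⟩,
       ⟨0xC00000 + H.next / 8, 0xC00000 + (H.next + 24 + 7) / 8⟩] →
      (e.reg .rsp).toNat - off + 8 ≤ y.lo ∨ y.hi ≤ (e.reg .rsp).toNat - off := by
    intro off h8 h48 y hy
    simp only [List.mem_cons, List.not_mem_nil, or_false] at hy
    rcases hy with hy | hy | hy | hy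
    · subst hy
      simp only
      u_omega
    · subst hy
      simp only
      u_omega
    · subst hy
      simp only
      u_omega
    · subst hy
      simp only
      u_omega
  -- the six saved registers: before the call (the pushes), and through the footprint (`slot_sameExcept`)
  have hp15 : s_107c29.mem.readLE (e.reg .rsp - 8) 8 = (e.reg .r15).toNat := by
    rw [w_mem_107c29]
    u_read
  have hp14 : s_107c29.mem.readLE (e.reg .rsp - 16) 8 = (e.reg .r14).toNat := by
    rw [w_mem_107c29]
    u_read
  have hp13 : s_107c29.mem.readLE (e.reg .rsp - 24) 8 = (e.reg .r13).toNat := by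
    rw [w_mem_107c29]
    u_read
  have hp12 : s_107c29.mem.readLE (e.reg .rsp - 32) 8 = (e.reg .r12).toNat := by
    rw [w_mem_107c29]
    u_read
  have hpbp : s_107c29.mem.readLE (e.reg .rsp - 40) 8 = (e.reg .rbp).toNat := by
    rw [w_mem_107c29]
    u_read
  have hpbx : s_107c29.mem.readLE (e.reg .rsp - 48) 8 = (e.reg .rbx).toNat := by
    rw [w_mem_107c29]
    u_read
  rw [w_mem_107c29] at hp15 hp14 hp13 hp12 hpbp hpbx
  have hs15 := slot_sameExcept w_same (e.reg .rsp) 8 8 _ (by omega) (by omega) hp15 (hmiss 8 (by omega) (by omega))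
  have hs14 := slot_sameExcept w_same (e.reg .rsp) 16 8 _ (by omega) (by omega) hp14 (hmiss 16 (by omega) (by omega))
  have hs13 := slot_sameExcept w_same (e.reg .rsp) 24 8 _ (by omega) (by omega) hp13 (hmiss 24 (by omega) (by omega))
  have hs12 := slot_sameExcept w_same (e.reg .rsp) 32 8 _ (by omega) (by omega) hp12 (hmiss 32 (by omega) (by omega))
  have hsbp := slot_sameExcept w_same (e.reg .rsp) 40 8 _ (by omega) (by omega) hpbp (hmiss 40 (by omega) (by omega))
  have hsbx := slot_sameExcept w_same (e.reg .rsp) 48 8 _ (by omega) (by omega) hpbx (hmiss 48 (by omega) (by omega))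
  clear hp15 hp14 hp13 hp12 hpbp hpbx
  -- 5. what was written since the entry: loose for the entry's heap and forest, so THE SHAPE OF THE ENTRY STILL HOLDS
  have hsameAll : Mem.SameExcept
      [⟨(e.reg .rsp).toNat - 208, (e.reg .rsp).toNat⟩,
       ⟨0x800000, 0x800008⟩,
       ⟨H.next - 32, H.next - 8⟩,
       ⟨0xC00000 + H.next / 8, 0xC00000 + (H.next + 24 + 7) / 8⟩] e.mem s_107c29r.mem := by u_same
  have hloose := Loose.alloc (F := F) (R := R) (k := 24) hok hbase ⟨hcur.1, hcur.2.1⟩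
    (lo := (e.reg .rsp).toNat - 208) (hi := (e.reg .rsp).toNat) (by omega) (by omega)
  have hshape : Shape F R s_107c29r.mem :=
    henv.ok.shape.sameExcept (henv.ok.owns.placed hok) hok ⟨hcur.1, hcur.2.1⟩ hsameAll hloose
  have hrem : rem R s_107c29r.mem = rem R e.mem := by
    apply rem_sameExcept hsameAll (by omega)
    intro y hy
    simp only [List.mem_cons, List.not_mem_nil, or_false] at hy
    rcases hy with hy | hy | hy | hy
    · subst hy
      simp only
      omega
    · subst hy
      simp only
      omega
    · subst hy
      simp only
      omega
    · subst hy
      simp only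
      omega
  have hsameE : Mem.SameExcept [⟨(e.reg .rsp).toNat - 208, (e.reg .rsp).toNat⟩, ⟨0x800000, 0x1000020⟩] e.mem
      s_107c29r.mem := by u_same
  -- the return address: its slot lies above the function's own stack and below the heap
  have hsra : UInt64.ofNat (s_107c29r.mem.readLE (e.reg .rsp) 8) = ret := by
    rw [hsameE.readLE (e.reg .rsp) 8 (by omega) ?_]
    · exact he_retAddr
    · intro y hy
      simp only [List.mem_cons, List.not_mem_nil, or_false] at hy
      rcases hy with hy | hy
      · subst hy
        simp only
        omega
      · subst hy
        simp only
        omega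
  have hbody : gab1_Body R len u₀ e ret s_107c29r := by
    refine ⟨w_rsp, w_rbx, w_rbp, ?_, w_r13, ?_, hs15, hs14, hs13, hs12, hsbp, hsbx, hsra, hrem, hsameE, w_eq, habi⟩
    · rw [w_r12, toNat_ofBV32, toNat_part32]
      exact hrcx
    · rw [w_r14, toNat_ofBV32, toNat_part32]
  -- 6. BOTH OUTCOMES, last: each closes the mid assertion with its heap
  by_cases hfit : H.Fits (r16 24)
  · -- ROOM: the new object `(H.next, 24)`, live and nobody's yet
    obtain ⟨k1, k2⟩ := hpost.1 hfit
    rw [e8] at k2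
    have hne : H.next ≠ 0 := by omega
    refine ReachVia.done ⟨H.push 24 (r16 24), hbody, w_rip, SameRegion.push H 24 (r16 24), k2, hshape,
      (henv.ok.owns.placed hok).push 24 (r16 24), ?_⟩
    rw [k1, if_neg hne]
    exact henv.ok.owns.push_cons hok 24 (r16 24)
  · -- NO ROOM: NULL, the heap of the entry
    obtain ⟨k1, k2, -, -⟩ := hpost.2 hfit
    rw [e8] at k2
    refine ReachVia.done ⟨H, hbody, w_rip, SameRegion.refl H, k2, hshape, henv.ok.owns.placed hok, ?_⟩
    rw [k1]
    simp only [UInt64.toNat_zero, if_true, List.nil_append]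
    exact henv.ok.owns

/-- **107C2EH (ret12) … 107C3CH → 107BA6H** (l.235 `*ExtensionBlocks = malloc(24)`): `r15 = rax`, the checked store of `*blocks` (inside gif,
live in the present heap), the jump to the cut. The pending list is now the empty array of one slot at `rax` — or still none, if
`rax = 0` (`GifOK.pend_first`): `AfterArray` for the present heap. -/
theorem gab1_first_from_malloc (Lay : Layout) (hLay : Lay.hi = 0x1000000) (μ : Microarch) (hμ : UserX.MicroOK μ) (u₀ : State)
    (hcode : HasCodeNat Lay u₀ Gif.L.GifAddExtensionBlock.entry Gif.Code.code_GifAddExtensionBlock.nat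
      Gif.L.GifAddExtensionBlock.size)
    (h_store8 : Asan.SmallCheck Lay μ ProgX.Base.WayInv (ProgX.Base.CodeOK u₀) [.rax, .rcx, .rdx] 8
      ProgX.Base.L.__asan_store8_noabort.entry)
    (H : Heap) (rest : List Obj) (frames : List (Nat × FrameLayout)) (F : Forest) (R : Rd) (len : Nat) (e : State) (ret : Word)
    (he : AtEntry (conv u₀) Gif.L.GifAddExtensionBlock.entry (GifAddExtensionBlock.spec H rest frames F R len).frame ret e)
    (hpre : (GifAddExtensionBlock.spec H rest frames F R len).pre e) (hnone : F.pend = none) (Hn : Heap) (w : State)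
    (hmid : gab1_MidA H rest frames F R len Hn u₀ e ret w) :
    ReachVia Lay μ ProgX.Base.WayInv w (fun z =>
      ∃ Hc Fc, GifAddExtensionBlock.AfterArray H rest frames F R len Hc Fc u₀ e ret z) := by
  -- 1. the entry state's facts, the mid assertion's
  have he' := he
  v_entry he
  have henv : Env H rest frames F R e := hpre.1
  have hrsi : (e.reg .rsi).toNat = F.gif + 88 := hpre.2.2.1
  have hcur := henv.ctx.cursor_range henv.heap.inv.shadow
  have hb := hmid.body
  have hokn := hmid.inv.heap
  have hbasen : Hn.base = 0x800000 := hmid.region.1.trans henv.heap.base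
  -- where gif is (from `Placed`: it survived the allocation); it is live in the present heap
  obtain ⟨hg1, hg2, hg3⟩ := hmid.placed.gif_where hokn hbasen
  have hglive : Hn.Live F.gif 120 := hmid.owns.live (F.gif, 120) (List.mem_append_right _ List.mem_cons_self)
  -- 2. the present state; `rax` as a variable
  obtain ⟨q, c_rax⟩ : ∃ q, w.reg .rax = q := ⟨_, rfl⟩
  have howns := hmid.owns
  rw [c_rax] at howns
  have w_rip := hmid.rip
  have c_rsp : w.reg .rsp = e.reg .rsp - 56 := hb.rsp
  have c_rbx : w.reg .rbx = e.reg .rsi := hb.rbx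
  have w_eq : Mem.EqOn ProgX.Base.L.textLo ProgX.Base.L.textHi u₀.mem w.mem := hb.code
  have hdf : w.flags .df = false := (show abiInv _ from hb.abi).1
  have hmx : w.mxcsr &&& 0x1F80 = 0x1F80 := (show abiInv _ from hb.abi).2
  have hsse := ProgX.Base.sseOK_of_abiInv hb.abi
  have w_kept : RegsKept [.rsp] w w := RegsKept.refl _ _
  -- 3. the walk, to the cut
  u_walk hcode [hμ.vendor] until [Gif.L.GifAddExtensionBlock.at_107ba6]
    span [ProgX.Base.L.textLo, ProgX.Base.L.textHi] side (v_side)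
  case check_107c34 =>
    -- l.235 `*ExtensionBlocks = …`: inside gif
    have hun : ShadowUntouched w.mem s_107c34.mem := by v_untouched
    have hl : LiveIn (Hn.liveObjs ++ rest) frames F.gif 120 := hglive.liveIn rest frames (Nat.le_refl _) (Nat.le_refl _)
    exact hl.accSmall hmid.inv.shadow hun _ 8 (by decide) (by u_omega) (by u_omega)
  -- 4. 107BA6H: `AfterArray` (`v_inv` FIRST); what was written since the return: the check's return address, `*blocks`
  have habi : (conv u₀).inv s_107c3c := by v_inv
  have hun : ShadowUntouched w.mem s_107c3c.mem := by v_untouched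
  have hsameW : Mem.SameExcept [⟨(e.reg .rsp).toNat - 64, (e.reg .rsp).toNat - 56⟩, ⟨F.gif + 88, F.gif + 96⟩] w.mem
      s_107c3c.mem := by
    rw [w_mem]
    u_same
  -- `*blocks` holds `rax`
  have hq : rd s_107c3c.mem (F.gif + 88) 8 = q.toNat := by
    have hq64 := q.toNat_lt
    rw [w_mem, rd_writeLE_same _ (e.reg .rsi) 8 q.toNat _ hrsi (by omega)]
    exact Nat.mod_eq_of_lt (by omega)
  -- 5. the state invariant (ONE step over the present heap and the returned memory), the heap's invariant, the frame
  have hok' := GifOK.pend_first hmid.shape hmid.placed hokn hbasen ⟨hcur.1, hcur.2.1⟩ hnone howns hsameW (by omega) (by omega) hq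
  have hinv' : HeapInv Hn rest frames ((e.reg .rsp).toNat - 56) s_107c3c.mem := by
    apply hmid.inv.sameExcept hun hsameW
    intro y hy
    simp only [List.mem_cons, List.not_mem_nil, or_false] at hy
    rcases hy with hy | hy
    · subst hy
      left
      left
      rw [hbasen]
      simp only
      omega
    · subst hy
      exact HeapWin.live hokn hglive (by simp only; omega) (by simp only; omega)
  have hframe := GifAddExtensionBlock.frame_carry hb.slot_r15 hb.slot_r14 hb.slot_r13 hb.slot_r12 hb.slot_rbp hb.slot_rbx hb.slot_ra
    hb.rem hb.same he_room he_top hcur hsameW (by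
    intro y hy
    simp only [List.mem_cons, List.not_mem_nil, or_false] at hy
    rcases hy with hy | hy
    · subst hy
      left
      simp only
      omega
    · subst hy
      right
      simp only
      omega)
  obtain ⟨k15, k14, k13, k12, kbp, kbx, kra, ksame, krem⟩ := hframe
  refine ReachVia.done ⟨Hn, _, he', hpre, w_rip, w_rsp, ?_, ?_, ?_, ?_, ?_, k15, k14, k13, k12, kbp, kbx, kra, hmid.region, ?_, ?_,
    hinv', hok', krem, ksame, ProgX.Base.conv_code_in w_eq, habi⟩
  · exact (w_kept.get .rbx rfl).trans hb.rbx
  · exact (w_kept.get .rbp rfl).trans hb.rbp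
  · rw [w_kept.get .r12 rfl]
    exact hb.r12
  · exact (w_kept.get .r13 rfl).trans hb.r13
  · rw [w_kept.get .r14 rfl]
    exact hb.r14
  · -- the forest differs in `pend` only
    exact ⟨rfl, rfl, rfl, rfl, rfl⟩
  · -- the array of one slot has room for the first block
    intro y hy
    by_cases hq0 : q.toNat = 0
    · simp only [hq0, if_true] at hy
      cases hy
    · simp only [hq0, if_false, Option.some.injEq] at hy
      rw [← hy]
      exact Nat.le_refl _

/-- **107B40H … 107B8AH, `call openbsd_reallocarray`, 107B8FH (ret3)** (l.231-239): the prologue, the checked load of `*blocks = x.arr ≠ 0`,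
the checked load of `*count = length`, `reallocarray(x.arr, length + 1, 24)` for the live array `(x.arr, 24 · cap)` of capacity
`c` (from `H.Live`). Its footprint is loose for the entry's heap and forest (`Loose.realloc`): the shape of the entry still
holds. THE THREE OUTCOMES of `ReallocPost`: in place (`H.resize`, `Owns.resize_head`), moved (`(H.push …).release`,
`Owns.push_cons` + `Owns.release`, `copy_moved`), failed (`FailPost`: the heap of the entry). The split comes LAST. -/
theorem gab1_grow_to_realloc (Lay : Layout) (hLay : Lay.hi = 0x1000000) (μ : Microarch) (hμ : UserX.MicroOK μ) (u₀ : State)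
    (hcode : HasCodeNat Lay u₀ Gif.L.GifAddExtensionBlock.entry Gif.Code.code_GifAddExtensionBlock.nat
      Gif.L.GifAddExtensionBlock.size)
    (h_realloc : ∀ (H : Heap) (rest : List Obj) (frames : List (Nat × FrameLayout)) (n c : Nat),
      Calls Lay μ ProgX.Base.WayInv (ProgX.Base.conv u₀) Gif.L.openbsd_reallocarray.entry
        (Gif.Spec.openbsd_reallocarray.spec H rest frames n c))
    (h_load8 : Asan.SmallCheck Lay μ ProgX.Base.WayInv (ProgX.Base.CodeOK u₀) [.rax, .rcx, .rdx] 8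
      ProgX.Base.L.__asan_load8_noabort.entry)
    (h_load4 : Asan.SmallCheck Lay μ ProgX.Base.WayInv (ProgX.Base.CodeOK u₀) [.rax, .rcx, .rdx] 4
      ProgX.Base.L.__asan_load4_noabort.entry)
    (H : Heap) (rest : List Obj) (frames : List (Nat × FrameLayout)) (F : Forest) (R : Rd) (len : Nat) (e : State) (ret : Word)
    (he : AtEntry (conv u₀) Gif.L.GifAddExtensionBlock.entry (GifAddExtensionBlock.spec H rest frames F R len).frame ret e)
    (hpre : (GifAddExtensionBlock.spec H rest frames F R len).pre e) (x : Exts) (hsome : F.pend = some x) :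
    ReachVia Lay μ ProgX.Base.WayInv e (fun w => ∃ Hn, gab1_MidB H rest frames F R len x Hn u₀ e ret w) := by
  -- 1. the entry state's facts
  v_entry he
  obtain ⟨henv, hrdi, hrsi, hrcx, hlen1, hlen2, hr8a, hr8b⟩ := hpre
  have hp := henv.heap
  have hok := hp.inv.heap
  have hbase := hp.base
  have hlimit := hp.limit
  have hcur := henv.ctx.cursor_range hp.inv.shadow
  -- where gif, the pending array and the next chunk are (one inequality per hypothesis: the walker's side conditions)
  obtain ⟨hg1, hg2, hg3⟩ := henv.ok.gif_where hok hbase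
  obtain ⟨ha1, ha2, ha3⟩ := henv.ok.pend_where hok hbase hsome
  obtain ⟨hnx1, hnx2⟩ := HeapPre.next_range hp
  have hglive : H.Live F.gif 120 := henv.ok.gif_live
  -- the pending array is live, with a capacity `c` (what `reallocarray`'s precondition and the in-place test speak of)
  obtain ⟨c, halc⟩ := henv.ok.pend_live hsome
  have hshape0 := henv.ok.shape.pend
  rw [hsome] at hshape0
  obtain ⟨hp1, hp2, hp3, -⟩ := hshape0
  simp only [gfield] at hp1 hp2
  -- what the forest owns, the array first
  have hperm : F.owned.Perm ((x.arr, 24 * x.cap) :: (x.blocks.flatMap Blk.objs ++ F.ownedButPend)) := by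
    have h := Forest.owned_pend F
    rw [hsome] at h
    exact h
  -- the count `n` and the array `a` as variables
  obtain ⟨n, hn⟩ : ∃ n, x.blocks.length = n := ⟨_, rfl⟩
  obtain ⟨a, ha⟩ : ∃ a, x.arr = a := ⟨_, rfl⟩
  rw [hn] at hp2 hp3
  rw [ha] at hp1 ha1 ha2 ha3 halc hperm
  have hn31 : n + 1 < 2 ^ 31 := by omega
  have hra := h_realloc H rest frames (24 * x.cap) c
  -- 2. the two loads, as facts for the walker: `*blocks = a ≠ 0` (the arm `*blocks == NULL` is pruned), `*count = n`
  have l_blocks : e.mem.readLE (e.reg .rsi) 8 = a := by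
    rw [rd_eq_readLE e.mem (e.reg .rsi) (F.gif + 88) 8 hrsi]
    exact hp1
  have l_count : e.mem.readLE (e.reg .rdi) 4 = n := by
    rw [rd_eq_readLE e.mem (e.reg .rdi) (F.gif + 80) 4 hrdi]
    exact hp2
  -- the three arguments as numbers
  have ea : (UInt64.ofNat a).toNat = a := toNat_ofNat_addr a (by omega)
  have en1 : (UInt64.ofNat (n + 1)).toNat = n + 1 := toNat_ofNat_addr (n + 1) (by omega)
  have e24 : (Word.ofBV 24#32).toNat = 24 := by decide
  -- 3. the walk, to the return of `reallocarray`
  u_walk hcode [hμ.vendor, cnt32_ofBV n (by omega), succ32_sext n hn31]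
    until [Gif.L.GifAddExtensionBlock.at_107c4d, Gif.L.GifAddExtensionBlock.at_107ba6]
    span [ProgX.Base.L.textLo, ProgX.Base.L.textHi] side (v_side)
  case check_107b60 =>
    -- l.234 `*ExtensionBlocks`: inside gif
    have hun : ShadowUntouched e.mem s_107b60.mem := by v_untouched
    have hl : LiveIn (H.liveObjs ++ rest) frames F.gif 120 := hglive.liveIn rest frames (Nat.le_refl _) (Nat.le_refl _)
    exact hl.accSmall hp.inv.shadow hun _ 8 (by decide) (by u_omega) (by u_omega)
  case check_107b74 =>
    -- l.239 `*ExtensionBlockCount`: inside gif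
    have hun : ShadowUntouched e.mem s_107b74.mem := by v_untouched
    have hl : LiveIn (H.liveObjs ++ rest) frames F.gif 120 := hglive.liveIn rest frames (Nat.le_refl _) (Nat.le_refl _)
    exact hl.accSmall hp.inv.shadow hun _ 4 (by decide) (by u_omega) (by u_omega)
  case call_inv =>
    v_inv
  case pre_107b8a =>
    -- reallocarray's precondition: only stack was stored to; the factors `length + 1` and 24; the live array
    have hun : ShadowUntouched e.mem s_107b8a.mem := by v_untouched
    have hstack : Mem.SameExcept [⟨(e.reg .rsp).toNat - 64, (e.reg .rsp).toNat⟩] e.mem s_107b8a.mem := by u_same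
    have hsame : Mem.EqOn H.base H.limit e.mem s_107b8a.mem := by
      rw [hbase, hlimit]
      apply hstack.eqOn
      intro y hy
      have e1 : y = ⟨(e.reg .rsp).toNat - 64, (e.reg .rsp).toNat⟩ := List.mem_singleton.mp hy
      subst e1
      simp only
      omega
    refine ⟨hp.callee hun hsame ?_ ?_ ?_, ?_, ?_, ?_, ?_, Or.inr ?_⟩
    · rw [w_rsp]
      u_omega
    · rw [w_rsp]
      u_omega
    · rw [w_rsp]
      u_omega
    · rw [w_rsi, en1]
      omega
    · rw [w_rsi, en1]
      omega
    · rw [w_rdx, e24]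
      omega
    · rw [w_rdx, e24]
      omega
    · rw [w_rdi, ea]
      exact halc
  -- 4. 107B8FH (ret3): `reallocarray` has returned: the post with its TYPE ASCRIBED (`rw` needs it), the arguments as numbers;
  --    its three clauses are split LAST (arrows in the context are case splits for `u_omega`)
  have hne : (s_107b8a.reg .rdi).toNat ≠ 0 := by
    rw [w_rdi_107b8a, ea]
    omega
  have hre : ReallocPost H rest frames 144 (s_107b8a.reg .rdi).toNat (24 * x.cap) c
      ((s_107b8a.reg .rsi).toNat * (s_107b8a.reg .rdx).toNat) s_107b8a s_107b8ar := w_post.2 hne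
  rw [w_rdi_107b8a, w_rsi_107b8a, w_rdx_107b8a, ea, en1, e24] at hre
  clear w_post
  have habi : (conv u₀).inv s_107b8ar := w_inv
  have e8 : (s_107b8a.reg .rsp).toNat + 8 = (e.reg .rsp).toNat - 56 := by
    rw [w_rsp_107b8a]
    u_omega
  -- where the array's capacity ends
  have hac := hok.obj_inside halc
  simp only at hac
  v_after_call w_rsp_107b8a w_mem_107b8a
  simp only [shadowSpan, w_rdi_107b8a, w_rsi_107b8a, w_rdx_107b8a, ea, en1, e24] at w_same
  -- every window of the callee's footprint misses the six slots: stated ONCE, before the slot facts enter the context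
  -- (`u_frame` of a slot through these 7 windows fails)
  have ersp : (e.reg .rsp - 64).toNat = (e.reg .rsp).toNat - 64 := word_sub_toNat_le _ 64 (by omega)
  have hmiss : ∀ off, 8 ≤ off → off ≤ 48 → ∀ y, y ∈
      [(⟨UInt64.toNat (e.reg .rsp - 64) - 144, UInt64.toNat (e.reg .rsp - 64)⟩ : Span),
       ⟨0x800000, 0x800008⟩,
       ⟨H.next - 32, H.next - 8⟩,
       ⟨0xC00000 + H.next / 8, 0xC00000 + (H.next + (n + 1) * 24 + 7) / 8⟩,
       ⟨H.next, H.next + (n + 1) * 24⟩,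
       ⟨a - 32, a - 16⟩,
       ⟨0xC00000 + a / 8, 0xC00000 + (a + c + 7) / 8⟩] →
      (e.reg .rsp).toNat - off + 8 ≤ y.lo ∨ y.hi ≤ (e.reg .rsp).toNat - off := by
    intro off h8 h48 y hy
    simp only [List.mem_cons, List.not_mem_nil, or_false] at hy
    rcases hy with hy | hy | hy | hy | hy | hy | hy
    · subst hy
      simp only
      u_omega
    · subst hy
      simp only
      u_omega
    · subst hy
      simp only
      u_omega
    · subst hy
      simp only
      u_omega
    · subst hy
      simp only
      u_omega
    · subst hy
      simp only
      u_omega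
    · subst hy
      simp only
      u_omega
  -- the six saved registers: before the call (the pushes), and through the footprint (`slot_sameExcept`)
  have hp15 : s_107b8a.mem.readLE (e.reg .rsp - 8) 8 = (e.reg .r15).toNat := by
    rw [w_mem_107b8a]
    u_read
  have hp14 : s_107b8a.mem.readLE (e.reg .rsp - 16) 8 = (e.reg .r14).toNat := by
    rw [w_mem_107b8a]
    u_read
  have hp13 : s_107b8a.mem.readLE (e.reg .rsp - 24) 8 = (e.reg .r13).toNat := by
    rw [w_mem_107b8a]
    u_read
  have hp12 : s_107b8a.mem.readLE (e.reg .rsp - 32) 8 = (e.reg .r12).toNat := by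
    rw [w_mem_107b8a]
    u_read
  have hpbp : s_107b8a.mem.readLE (e.reg .rsp - 40) 8 = (e.reg .rbp).toNat := by
    rw [w_mem_107b8a]
    u_read
  have hpbx : s_107b8a.mem.readLE (e.reg .rsp - 48) 8 = (e.reg .rbx).toNat := by
    rw [w_mem_107b8a]
    u_read
  rw [w_mem_107b8a] at hp15 hp14 hp13 hp12 hpbp hpbx
  have hs15 := slot_sameExcept w_same (e.reg .rsp) 8 8 _ (by omega) (by omega) hp15 (hmiss 8 (by omega) (by omega))
  have hs14 := slot_sameExcept w_same (e.reg .rsp) 16 8 _ (by omega) (by omega) hp14 (hmiss 16 (by omega) (by omega))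
  have hs13 := slot_sameExcept w_same (e.reg .rsp) 24 8 _ (by omega) (by omega) hp13 (hmiss 24 (by omega) (by omega))
  have hs12 := slot_sameExcept w_same (e.reg .rsp) 32 8 _ (by omega) (by omega) hp12 (hmiss 32 (by omega) (by omega))
  have hsbp := slot_sameExcept w_same (e.reg .rsp) 40 8 _ (by omega) (by omega) hpbp (hmiss 40 (by omega) (by omega))
  have hsbx := slot_sameExcept w_same (e.reg .rsp) 48 8 _ (by omega) (by omega) hpbx (hmiss 48 (by omega) (by omega))
  clear hp15 hp14 hp13 hp12 hpbp hpbx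
  -- the footprint of the call, over the memory at the callee's entry (for the copy clause)
  have w_same0 := w_same
  rw [← w_mem_107b8a] at w_same0
  -- 5. what was written since the entry: loose for the entry's heap and forest, so THE SHAPE OF THE ENTRY STILL HOLDS
  --    (in all three outcomes: the static footprint does not depend on them)
  have hsameAll : Mem.SameExcept
      [⟨(e.reg .rsp).toNat - 208, (e.reg .rsp).toNat⟩,
       ⟨0x800000, 0x800008⟩,
       ⟨H.next - 32, H.next - 8⟩,
       ⟨0xC00000 + H.next / 8, 0xC00000 + (H.next + (n + 1) * 24 + 7) / 8⟩,
       ⟨H.next, H.next + (n + 1) * 24⟩,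
       ⟨a - 32, a - 16⟩,
       ⟨0xC00000 + a / 8, 0xC00000 + (a + c + 7) / 8⟩] e.mem s_107b8ar.mem := by u_same
  have hloose := Loose.realloc (F := F) (R := R) (m := (n + 1) * 24) hok hbase ⟨hcur.1, hcur.2.1⟩
    (lo := (e.reg .rsp).toNat - 208) (hi := (e.reg .rsp).toNat) (by omega) (by omega) halc
  have hshape : Shape F R s_107b8ar.mem :=
    henv.ok.shape.sameExcept (henv.ok.owns.placed hok) hok ⟨hcur.1, hcur.2.1⟩ hsameAll hloose
  have hsameE : Mem.SameExcept [⟨(e.reg .rsp).toNat - 208, (e.reg .rsp).toNat⟩, ⟨0x800000, 0x1000020⟩] e.mem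
      s_107b8ar.mem := by u_same
  have hrem : rem R s_107b8ar.mem = rem R e.mem := by
    apply rem_sameExcept hsameE (by omega)
    intro y hy
    simp only [List.mem_cons, List.not_mem_nil, or_false] at hy
    rcases hy with hy | hy
    · subst hy
      simp only
      omega
    · subst hy
      simp only
      omega
  -- the return address: its slot lies above the function's own stack and below the heap
  have hsra : UInt64.ofNat (s_107b8ar.mem.readLE (e.reg .rsp) 8) = ret := by
    rw [hsameE.readLE (e.reg .rsp) 8 (by omega) ?_]
    · exact he_retAddr
    · intro y hy
      simp only [List.mem_cons, List.not_mem_nil, or_false] at hy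
      rcases hy with hy | hy
      · subst hy
        simp only
        omega
      · subst hy
        simp only
        omega
  have hbody : gab1_Body R len u₀ e ret s_107b8ar := by
    refine ⟨w_rsp, w_rbx, w_rbp, ?_, w_r13, ?_, hs15, hs14, hs13, hs12, hsbp, hsbx, hsra, hrem, hsameE, w_eq, habi⟩
    · rw [w_r12, toNat_ofBV32, toNat_part32]
      exact hrcx
    · rw [w_r14, toNat_ofBV32, toNat_part32]
  -- 6. THE THREE OUTCOMES, last: each closes the mid assertion with its heap, `Placed` of the OLD forest carried along
  have hplaced := henv.ok.owns.placed hok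
  obtain ⟨hin, hmv, hfail⟩ := hre
  subst hn
  subst ha
  by_cases hc : r16 ((x.blocks.length + 1) * 24) ≤ c
  · -- IN PLACE: the same address, the array resized
    obtain ⟨k1, k2, -⟩ := hin hc
    rw [e8] at k2
    have ho := (henv.ok.owns.perm hperm).resize_head ((x.blocks.length + 1) * 24)
    refine ReachVia.done ⟨H.resize x.arr ((x.blocks.length + 1) * 24), hbody, w_rip, SameRegion.resize H _ _, k2, hshape,
      hplaced.resize _ _, Or.inr ⟨?_, ?_, ?_⟩⟩
    · rw [k1]
      omega
    · rw [k1]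
      exact ho
    · intro i _
      rw [k1]
  · by_cases hf : H.Fits (r16 ((x.blocks.length + 1) * 24))
    · -- MOVED: the new object, the old one freed, its bytes copied
      obtain ⟨k1, k2, k3⟩ := hmv (by omega) hf
      rw [e8] at k2
      have h1 := henv.ok.owns.push_cons hok ((x.blocks.length + 1) * 24) (H.moveCap ((x.blocks.length + 1) * 24))
      have hp2 : ((H.next, (x.blocks.length + 1) * 24) :: F.owned).Perm
          ((x.arr, 24 * x.cap) :: ((H.next, (x.blocks.length + 1) * 24) :: (x.blocks.flatMap Blk.objs ++ F.ownedButPend))) :=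
        (hperm.cons _).trans (List.Perm.swap _ _ _)
      have ho := h1.release hp2
      have hcopy := copy_moved hok hbase halc (by u_omega) w_same0 k3
      refine ReachVia.done ⟨(H.push ((x.blocks.length + 1) * 24) (H.moveCap ((x.blocks.length + 1) * 24))).release x.arr, hbody,
        w_rip, (SameRegion.push H _ _).trans (SameRegion.release _ _), k2, hshape, (hplaced.push _ _).release _,
        Or.inr ⟨?_, ?_, ?_⟩⟩
      · rw [k1]
        omega
      · rw [k1]
        exact ho
      · intro i hi
        rw [k1]
        exact hcopy i (by omega)
    · -- FAILED: NULL, the heap of the entry, the array as it was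
      obtain ⟨k1, k2, -, -⟩ := hfail (by omega) hf
      rw [e8] at k2
      exact ReachVia.done ⟨H, hbody, w_rip, SameRegion.refl H, k2, hshape, hplaced, Or.inl ⟨k1, rfl, henv.ok.owns⟩⟩

/-- **107B8FH (ret3) … 107B95H, 107C41H → 107C4DH** (l.241-242 `if (ep_new == NULL) return GIF_ERROR`): `reallocarray` FAILED: `rax = 0`, the heap
is the entry's, the array is still owned, nothing but stack was written since the entry and nothing at all since the return:
`Done` for the heap and the forest of the ENTRY. -/
theorem gab1_grow_failed (Lay : Layout) (hLay : Lay.hi = 0x1000000) (μ : Microarch) (hμ : UserX.MicroOK μ) (u₀ : State)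
    (hcode : HasCodeNat Lay u₀ Gif.L.GifAddExtensionBlock.entry Gif.Code.code_GifAddExtensionBlock.nat
      Gif.L.GifAddExtensionBlock.size)
    (H : Heap) (rest : List Obj) (frames : List (Nat × FrameLayout)) (F : Forest) (R : Rd) (len : Nat) (e : State) (ret : Word)
    (he : AtEntry (conv u₀) Gif.L.GifAddExtensionBlock.entry (GifAddExtensionBlock.spec H rest frames F R len).frame ret e)
    (hpre : (GifAddExtensionBlock.spec H rest frames F R len).pre e) (x : Exts) (w : State)
    (hmid : gab1_MidB H rest frames F R len x H u₀ e ret w) (hrax : w.reg .rax = 0) (howns : Owns H F.owned) :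
    ReachVia Lay μ ProgX.Base.WayInv w (GifAddExtensionBlock.Done H rest frames F R len H F u₀ e ret) := by
  -- 1. the entry state's facts; the present state (`rax = 0` as a fact: the arm `rax != NULL` is pruned)
  have he' := he
  v_entry he
  have hb := hmid.body
  have c_rax : w.reg .rax = 0 := hrax
  have w_rip := hmid.rip
  have c_rsp : w.reg .rsp = e.reg .rsp - 56 := hb.rsp
  have w_eq : Mem.EqOn ProgX.Base.L.textLo ProgX.Base.L.textHi u₀.mem w.mem := hb.code
  have hdf : w.flags .df = false := (show abiInv _ from hb.abi).1
  have hmx : w.mxcsr &&& 0x1F80 = 0x1F80 := (show abiInv _ from hb.abi).2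
  have hsse := ProgX.Base.sseOK_of_abiInv hb.abi
  have w_kept : RegsKept [.rsp] w w := RegsKept.refl _ _
  -- 2. the walk
  u_walk hcode [hμ.vendor] until [Gif.L.GifAddExtensionBlock.at_107c4d, Gif.L.GifAddExtensionBlock.at_107ba6]
    span [ProgX.Base.L.textLo, ProgX.Base.L.textHi] side (v_side)
  -- 3. 107C4DH: `Done` for the heap and the forest of the ENTRY; nothing was stored since the return
  have habi : (conv u₀).inv s_107c46 := by v_inv
  refine ReachVia.done ⟨he', hpre, w_rip, w_rsp, ?_, ?_, ?_, ?_, ?_, ?_, ?_, ?_, SameRegion.refl H, Forest.SameButPend.refl F, ?_, ?_,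
    ?_, ?_, ProgX.Base.conv_code_in w_eq, habi⟩
  · -- GIF_ERROR
    right
    rw [w_rax]
    decide
  · rw [w_mem]
    exact hb.slot_r15
  · rw [w_mem]
    exact hb.slot_r14
  · rw [w_mem]
    exact hb.slot_r13
  · rw [w_mem]
    exact hb.slot_r12
  · rw [w_mem]
    exact hb.slot_rbp
  · rw [w_mem]
    exact hb.slot_rbx
  · rw [w_mem]
    exact hb.slot_ra
  · rw [w_mem]
    exact hmid.inv
  · rw [w_mem]
    exact ⟨howns, hmid.shape⟩
  · rw [w_mem]
    exact hb.rem
  · rw [w_mem]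
    exact hb.same

/-- **107B8FH (ret3) … 107BA3H → 107BA6H** (l.244 `*ExtensionBlocks = ep_new`): `reallocarray` succeeded, IN PLACE OR MOVED (`rax ≠ 0`; the walk
and the ownership step are the same): the checked store of `*blocks` (inside gif, live in the present heap). The pending list is
now the old blocks in the array `(rax, length + 1 slots)` (`GifOK.pend_grown`): `AfterArray` for the present heap. -/
theorem gab1_grow_store (Lay : Layout) (hLay : Lay.hi = 0x1000000) (μ : Microarch) (hμ : UserX.MicroOK μ) (u₀ : State)
    (hcode : HasCodeNat Lay u₀ Gif.L.GifAddExtensionBlock.entry Gif.Code.code_GifAddExtensionBlock.nat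
      Gif.L.GifAddExtensionBlock.size)
    (h_store8 : Asan.SmallCheck Lay μ ProgX.Base.WayInv (ProgX.Base.CodeOK u₀) [.rax, .rcx, .rdx] 8
      ProgX.Base.L.__asan_store8_noabort.entry)
    (H : Heap) (rest : List Obj) (frames : List (Nat × FrameLayout)) (F : Forest) (R : Rd) (len : Nat) (e : State) (ret : Word)
    (he : AtEntry (conv u₀) Gif.L.GifAddExtensionBlock.entry (GifAddExtensionBlock.spec H rest frames F R len).frame ret e)
    (hpre : (GifAddExtensionBlock.spec H rest frames F R len).pre e) (x : Exts) (hsome : F.pend = some x) (Hn : Heap) (w : State)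
    (hmid : gab1_MidB H rest frames F R len x Hn u₀ e ret w) (hrax : (w.reg .rax).toNat ≠ 0)
    (howns : Owns Hn (((w.reg .rax).toNat, (x.blocks.length + 1) * 24) :: (x.blocks.flatMap Blk.objs ++ F.ownedButPend)))
    (hcopy : ∀ i, i < 24 * x.blocks.length → rd w.mem ((w.reg .rax).toNat + i) 1 = rd w.mem (x.arr + i) 1) :
    ReachVia Lay μ ProgX.Base.WayInv w (fun z =>
      ∃ Hc Fc, GifAddExtensionBlock.AfterArray H rest frames F R len Hc Fc u₀ e ret z) := by
  -- 1. the entry state's facts, the mid assertion's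
  have he' := he
  v_entry he
  have henv : Env H rest frames F R e := hpre.1
  have hrsi : (e.reg .rsi).toNat = F.gif + 88 := hpre.2.2.1
  have hcur := henv.ctx.cursor_range henv.heap.inv.shadow
  have hb := hmid.body
  have hokn := hmid.inv.heap
  have hbasen : Hn.base = 0x800000 := hmid.region.1.trans henv.heap.base
  -- where gif is (from `Placed`: it survived the `realloc`); it is live in the present heap
  obtain ⟨hg1, hg2, hg3⟩ := hmid.placed.gif_where hokn hbasen
  have hglive : Hn.Live F.gif 120 :=
    howns.live (F.gif, 120) (List.mem_cons_of_mem _ (List.mem_append_right _ List.mem_cons_self))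
  -- 2. the present state; `rax` as a variable; the size in the forest's form (`24 * k`; the callee says `k * 24`: ONE `Nat.mul_comm`,
  --    here, where no heap term occurs)
  obtain ⟨q, c_rax⟩ : ∃ q, w.reg .rax = q := ⟨_, rfl⟩
  rw [c_rax] at hrax howns hcopy
  rw [Nat.mul_comm] at howns
  have w_rip := hmid.rip
  have c_rsp : w.reg .rsp = e.reg .rsp - 56 := hb.rsp
  have c_rbx : w.reg .rbx = e.reg .rsi := hb.rbx
  have w_eq : Mem.EqOn ProgX.Base.L.textLo ProgX.Base.L.textHi u₀.mem w.mem := hb.code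
  have hdf : w.flags .df = false := (show abiInv _ from hb.abi).1
  have hmx : w.mxcsr &&& 0x1F80 = 0x1F80 := (show abiInv _ from hb.abi).2
  have hsse := ProgX.Base.sseOK_of_abiInv hb.abi
  have w_kept : RegsKept [.rsp] w w := RegsKept.refl _ _
  -- 3. the walk: the arm `rax == NULL` is pruned (`hrax`)
  u_walk hcode [hμ.vendor] until [Gif.L.GifAddExtensionBlock.at_107c4d, Gif.L.GifAddExtensionBlock.at_107ba6]
    span [ProgX.Base.L.textLo, ProgX.Base.L.textHi] side (v_side)
  case check_107b9e =>
    -- l.244 `*ExtensionBlocks = …`: inside gif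
    have hun : ShadowUntouched w.mem s_107b9e.mem := by v_untouched
    have hl : LiveIn (Hn.liveObjs ++ rest) frames F.gif 120 := hglive.liveIn rest frames (Nat.le_refl _) (Nat.le_refl _)
    exact hl.accSmall hmid.inv.shadow hun _ 8 (by decide) (by u_omega) (by u_omega)
  -- 4. 107BA6H: `AfterArray` (`v_inv` FIRST); what was written since the return: the check's return address, `*blocks`
  have habi : (conv u₀).inv s_107ba3 := by v_inv
  have hun : ShadowUntouched w.mem s_107ba3.mem := by v_untouched
  have hsameW : Mem.SameExcept [⟨(e.reg .rsp).toNat - 64, (e.reg .rsp).toNat - 56⟩, ⟨F.gif + 88, F.gif + 96⟩] w.mem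
      s_107ba3.mem := by
    rw [w_mem]
    u_same
  -- `*blocks` holds `rax`
  have hq : rd s_107ba3.mem (F.gif + 88) 8 = q.toNat := by
    have hq64 := q.toNat_lt
    rw [w_mem, rd_writeLE_same _ (e.reg .rsi) 8 q.toNat _ hrsi (by omega)]
    exact Nat.mod_eq_of_lt (by omega)
  -- 5. the state invariant (ONE step, in place and moved alike), the heap's invariant, the frame
  have hok' := GifOK.pend_grown hmid.shape hmid.placed hokn hbasen ⟨hcur.1, hcur.2.1⟩ hsome howns (Nat.le_succ _) hcopy hsameW
    (by omega) (by omega) hq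
  have hinv' : HeapInv Hn rest frames ((e.reg .rsp).toNat - 56) s_107ba3.mem := by
    apply hmid.inv.sameExcept hun hsameW
    intro y hy
    simp only [List.mem_cons, List.not_mem_nil, or_false] at hy
    rcases hy with hy | hy
    · subst hy
      left
      left
      rw [hbasen]
      simp only
      omega
    · subst hy
      exact HeapWin.live hokn hglive (by simp only; omega) (by simp only; omega)
  have hframe := GifAddExtensionBlock.frame_carry hb.slot_r15 hb.slot_r14 hb.slot_r13 hb.slot_r12 hb.slot_rbp hb.slot_rbx hb.slot_ra
    hb.rem hb.same he_room he_top hcur hsameW (by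
    intro y hy
    simp only [List.mem_cons, List.not_mem_nil, or_false] at hy
    rcases hy with hy | hy
    · subst hy
      left
      simp only
      omega
    · subst hy
      right
      simp only
      omega)
  obtain ⟨k15, k14, k13, k12, kbp, kbx, kra, ksame, krem⟩ := hframe
  refine ReachVia.done ⟨Hn, _, he', hpre, w_rip, w_rsp, ?_, ?_, ?_, ?_, ?_, k15, k14, k13, k12, kbp, kbx, kra, hmid.region, ?_, ?_,
    hinv', hok', krem, ksame, ProgX.Base.conv_code_in w_eq, habi⟩
  · exact (w_kept.get .rbx rfl).trans hb.rbx
  · exact (w_kept.get .rbp rfl).trans hb.rbp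
  · rw [w_kept.get .r12 rfl]
    exact hb.r12
  · exact (w_kept.get .r13 rfl).trans hb.r13
  · rw [w_kept.get .r14 rfl]
    exact hb.r14
  · -- the forest differs in `pend` only
    exact ⟨rfl, rfl, rfl, rfl, rfl⟩
  · -- the array has a slot behind the counted blocks
    intro y hy
    simp only [Option.some.injEq] at hy
    rw [← hy]
    exact Nat.le_refl _

end Gif.Spec.GifAddExtensionBlock_1
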